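-- pv_equiv track=rewrite | github.com/Revi1337/BaekJoon-Coding-Test | 백준/Gold/9205. 맥주 마시면서 걸어가기/맥주 마시면서 걸어가기.py | solution
-- ===== SOURCE A (Python) =====
-- from collections import deque
--
-- def solution(N, home, marks, fes):
--     check = [0] * N
--     queue = deque([(home[0], home[1])])
--     while queue:
--         row, col = queue.popleft()
--         if abs(row - fes[0]) + abs(col - fes[1]) <= 1000:
--             return 'happy'
--         for idx in range(N):
--             if not check[idx]:
--                 nrow, ncol = marks[idx]
--                 if abs(row - nrow) + abs(col - ncol) <= 1000:
--                     check[idx] = 1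
--                     queue.append((nrow, ncol))
--     return 'sad'
-- ===== SOURCE B (Python) =====
-- def solution(N, home, marks, fes):
--     # Boolean fixpoint iteration (dense saturation) instead of BFS with a queue.
--     pts = marks[:max(N, 0)]
--     n = len(pts)
--
--     def near(p, q):
--         return abs(p[0] - q[0]) + abs(p[1] - q[1]) <= 1000
--
--     reach = [near(home, p) for p in pts]
--     for _ in range(n):
--         reach = [reach[i] or any(reach[j] and near(pts[j], pts[i]) for j in range(n))
--                  for i in range(n)]
--     if near(home, fes) or any(reach[i] and near(pts[i], fes) for i in range(n)):
--         return 'happy'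
--     return 'sad'
-- ===== Notes on version B (the rewrite author's own statement) =====
-- stated objective: alternative
-- what changed: Replaces A's queue-based BFS with mutable visited flags by a pure boolean least-fixpoint iteration: the reachable-mark vector is recomputed n times from the full distance relation, with no queue and no in-place marking.
-- crash fix: On inputs with N > len(marks) and home not within 1000 of fes, A raises IndexError on marks[idx]; B just uses the marks that exist and returns 'happy' or 'sad' accordingly. — e.g. on solution(3, (0, 0), [(1, 1)], (5000, 5000)): A raises IndexError, B returns "sad"
import Mathlib
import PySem

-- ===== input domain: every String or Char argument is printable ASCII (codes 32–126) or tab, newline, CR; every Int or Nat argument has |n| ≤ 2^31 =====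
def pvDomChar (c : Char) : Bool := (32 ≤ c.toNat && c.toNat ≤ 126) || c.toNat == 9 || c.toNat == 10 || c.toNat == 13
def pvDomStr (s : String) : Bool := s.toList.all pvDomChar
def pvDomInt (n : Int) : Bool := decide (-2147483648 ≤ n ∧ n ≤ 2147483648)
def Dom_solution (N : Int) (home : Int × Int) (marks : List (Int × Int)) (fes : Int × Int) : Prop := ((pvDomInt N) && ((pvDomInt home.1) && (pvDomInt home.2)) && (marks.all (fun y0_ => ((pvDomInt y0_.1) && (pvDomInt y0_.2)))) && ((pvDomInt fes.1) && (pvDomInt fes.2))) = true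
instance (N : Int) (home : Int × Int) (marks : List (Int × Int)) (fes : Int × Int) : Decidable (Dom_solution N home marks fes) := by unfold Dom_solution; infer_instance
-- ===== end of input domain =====

-- B replaces A's queue BFS (mutable check[] + deque) by a pure boolean fixpoint iteration
-- over the mark-distance relation; same exact return value (objective: alternative).

-- ===== PORT A =====
-- A's BFS: a queue of points and a 0/1 check list.  The fuel argument only makes the
-- while-loop total; 2*len+2 steps are proved sufficient below (each iteration pops one
-- element and every enqueue flips one check entry from 0 to 1).
def pvNear (p q : Int × Int) : Bool := decide (|p.1 - q.1| + |p.2 - q.2| ≤ 1000)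

-- body of A's inner `for idx in range(N)` loop
def pvStepA (pts : List (Int × Int)) (cur : Int × Int) (st : List Int × List (Int × Int))
    (idx : Nat) : List Int × List (Int × Int) :=
  if st.1.getD idx 0 == 0 then
    if pvNear cur (pts.getD idx (0, 0)) then
      (st.1.set idx 1, st.2 ++ [pts.getD idx (0, 0)])
    else st
  else st

-- A's `while queue:` loop
def pvBfs (pts : List (Int × Int)) (fes : Int × Int) :
    Nat → List Int → List (Int × Int) → String
  | 0, _, _ => "sad"
  | _ + 1, _, [] => "sad"
  | fuel + 1, check, cur :: rest =>
      if pvNear cur fes then "happy"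
      else
        let st := (List.range pts.length).foldl (pvStepA pts cur) (check, rest)
        pvBfs pts fes fuel st.1 st.2

def solution (N : Int) (home : Int × Int) (marks : List (Int × Int)) (fes : Int × Int) : String :=
  let pts := marks.take N.toNat
  pvBfs pts fes (2 * pts.length + 2) (List.replicate pts.length 0) [home]

-- ===== PORT B =====
-- one saturation pass: reach[i] := reach[i] or any j near i already reached
def pvStepB (pts : List (Int × Int)) (reach : List Bool) : List Bool :=
  (List.range pts.length).map (fun i =>
    reach.getD i false ||
      (List.range pts.length).any (fun j =>
        reach.getD j false && pvNear (pts.getD j (0, 0)) (pts.getD i (0, 0))))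

def solution_alt (N : Int) (home : Int × Int) (marks : List (Int × Int)) (fes : Int × Int) : String :=
  let pts := marks.take N.toNat
  let init := pts.map (fun p => pvNear home p)
  let reach := (List.range pts.length).foldl (fun r _ => pvStepB pts r) init
  if pvNear home fes ||
      (List.range pts.length).any (fun i => reach.getD i false && pvNear (pts.getD i (0, 0)) fes)
  then "happy" else "sad"

-- ===== PRECONDITION & SPEC =====
-- Pre_ excludes exactly the inputs on which A raises IndexError: N > len(marks) with home
-- not already within 1000 of fes (otherwise A answers 'happy' before ever touching marks).
def Pre_solution (N : Int) (home : Int × Int) (marks : List (Int × Int)) (fes : Int × Int) : Prop :=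
  N ≤ (marks.length : Int) ∨ pvNear home fes = true
instance (N : Int) (home : Int × Int) (marks : List (Int × Int)) (fes : Int × Int) : Decidable (Pre_solution N home marks fes) := by unfold Pre_solution; infer_instance

def pvWitness_solution : Int × (Int × Int) × (List (Int × Int)) × (Int × Int) :=
  (2, (0, 0), [(500, 500), (2000, 2000)], (1000, 1000))

-- On inputs with N > len(marks) and home not within 1000 of fes, A raises IndexError on
-- marks[idx]; B just uses the marks that exist and returns 'happy' or 'sad' accordingly.
def Raises_solution (N : Int) (home : Int × Int) (marks : List (Int × Int)) (fes : Int × Int) : Prop :=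
  (marks.length : Int) < N ∧ pvNear home fes = false
instance (N : Int) (home : Int × Int) (marks : List (Int × Int)) (fes : Int × Int) : Decidable (Raises_solution N home marks fes) := by unfold Raises_solution; infer_instance

def pvRaiseWitness_solution : Int × (Int × Int) × (List (Int × Int)) × (Int × Int) :=
  (3, (0, 0), [(1, 1)], (5000, 5000))
def pvRaiseWitnessOut_solution : String := "sad"

def Spec_solution (N : Int) (home : Int × Int) (marks : List (Int × Int)) (fes : Int × Int) (out : String) : Prop := out = solution_alt N home marks fes
instance (N : Int) (home : Int × Int) (marks : List (Int × Int)) (fes : Int × Int) (out : String) : Decidable (Spec_solution N home marks fes out) := by unfold Spec_solution; infer_instance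

-- ===== CLAIM (what is proved, stated in full; the proofs are below) =====
def Claim_equal_solution : Prop := ∀ (N : Int) (home : Int × Int) (marks : List (Int × Int)) (fes : Int × Int), Dom_solution N home marks fes → Pre_solution N home marks fes → Spec_solution N home marks fes (solution N home marks fes)

def Claim_raises_solution : Prop := (∀ (N : Int) (home : Int × Int) (marks : List (Int × Int)) (fes : Int × Int), Dom_solution N home marks fes → Raises_solution N home marks fes → ¬ Pre_solution N home marks fes) ∧ (Dom_solution (pvRaiseWitness_solution.1) (pvRaiseWitness_solution.2.1) (pvRaiseWitness_solution.2.2.1) (pvRaiseWitness_solution.2.2.2) ∧ Raises_solution (pvRaiseWitness_solution.1) (pvRaiseWitness_solution.2.1) (pvRaiseWitness_solution.2.2.1) (pvRaiseWitness_solution.2.2.2) ∧ solution_alt (pvRaiseWitness_solution.1) (pvRaiseWitness_solution.2.1) (pvRaiseWitness_solution.2.2.1) (pvRaiseWitness_solution.2.2.2) = pvRaiseWitnessOut_solution)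

-- ===== LEMMAS AND PROOFS =====

theorem pv_getD_set_ne (l : List Int) (v : Int) {i j : Nat} (h : i ≠ j) :
    (l.set i v).getD j 0 = l.getD j 0 := by
  simp [List.getD_eq_getElem?_getD, List.getElem?_set_ne h]

theorem pv_getD_set_self (l : List Int) (v : Int) {i : Nat} (h : i < l.length) :
    (l.set i v).getD i 0 = v := by
  simp [List.getD_eq_getElem?_getD, List.getElem?_set_eq_of_lt _ h]

theorem pv_foldA_go (pts : List (Int × Int)) (cur : Int × Int) (L : List Nat)
    (hnd : L.Nodup) (hL : ∀ i ∈ L, i < pts.length) :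
    ∀ (check : List Int) (rest : List (Int × Int)), check.length = pts.length →
      (L.foldl (pvStepA pts cur) (check, rest)).1.length = pts.length ∧
      (∀ i, (L.foldl (pvStepA pts cur) (check, rest)).1.getD i 0 =
        if i ∈ L.filter (fun i => check.getD i 0 == 0 && pvNear cur (pts.getD i (0, 0)))
        then 1 else check.getD i 0) ∧
      (L.foldl (pvStepA pts cur) (check, rest)).2 =
        rest ++ (L.filter (fun i => check.getD i 0 == 0 && pvNear cur (pts.getD i (0, 0)))).map
          (fun i => pts.getD i (0, 0)) := by
  induction L with
  | nil => intro check rest hlen; simp [hlen]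
  | cons i0 L ih =>
      intro check rest hlen
      have hi0 : i0 < pts.length := hL i0 (List.mem_cons_self ..)
      have hnd' : L.Nodup := hnd.of_cons
      have hi0n : i0 ∉ L := (List.nodup_cons.mp hnd).1
      have hL' : ∀ i ∈ L, i < pts.length := fun i hi => hL i (List.mem_cons_of_mem _ hi)
      by_cases hc0 : check.getD i0 0 = 0
      · have hc0' : (check.getD i0 0 == 0) = true := by rw [hc0]; rfl
        by_cases hnr : pvNear cur (pts.getD i0 (0, 0)) = true
        · -- triggered
          have hstep : pvStepA pts cur (check, rest) i0
              = (check.set i0 1, rest ++ [pts.getD i0 (0, 0)]) := by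
            simp only [pvStepA]
            rw [if_pos hc0', if_pos hnr]
          have hlen2 : (check.set i0 1).length = pts.length := by simp [hlen]
          obtain ⟨g1, g2, g3⟩ := ih hnd' hL' (check.set i0 1) (rest ++ [pts.getD i0 (0, 0)]) hlen2
          have hfiltagree : L.filter (fun i => (check.set i0 1).getD i 0 == 0 && pvNear cur (pts.getD i (0, 0)))
              = L.filter (fun i => check.getD i 0 == 0 && pvNear cur (pts.getD i (0, 0))) := by
            apply List.filter_congr
            intro j hj
            have hne : i0 ≠ j := fun e => hi0n (e ▸ hj)
            rw [pv_getD_set_ne _ _ hne]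
          have hfull : (i0 :: L).filter (fun i => check.getD i 0 == 0 && pvNear cur (pts.getD i (0, 0)))
              = i0 :: L.filter (fun i => check.getD i 0 == 0 && pvNear cur (pts.getD i (0, 0))) := by
            rw [List.filter_cons_of_pos (by rw [hc0', hnr]; rfl)]
          rw [List.foldl_cons, hstep]
          refine ⟨by rw [g1], ?_, ?_⟩
          · intro i
            rw [g2 i, hfiltagree, hfull]
            by_cases hiL : i ∈ L.filter (fun i => check.getD i 0 == 0 && pvNear cur (pts.getD i (0, 0)))
            · rw [if_pos hiL, if_pos (List.mem_cons_of_mem _ hiL)]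
            · by_cases hii0 : i = i0
              · subst hii0
                simp only [hiL, if_false, List.mem_cons, true_or, if_true]
                exact pv_getD_set_self _ _ (hlen ▸ hi0)
              · simp only [hiL, if_false, List.mem_cons, hii0, false_or]
                exact pv_getD_set_ne _ _ (fun e => hii0 e.symm)
          · rw [g3, hfiltagree, hfull]
            simp
        · have hstep : pvStepA pts cur (check, rest) i0 = (check, rest) := by
            simp only [pvStepA]
            rw [if_pos hc0', if_neg hnr]
          have hfull : (i0 :: L).filter (fun i => check.getD i 0 == 0 && pvNear cur (pts.getD i (0, 0)))
              = L.filter (fun i => check.getD i 0 == 0 && pvNear cur (pts.getD i (0, 0))) := by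
            rw [List.filter_cons_of_neg (by rw [hc0']; simpa using hnr)]
          rw [List.foldl_cons, hstep, hfull]
          exact ih hnd' hL' check rest hlen
      · have hc0' : (check.getD i0 0 == 0) = false := by rw [beq_eq_false_iff_ne]; exact hc0
        have hstep : pvStepA pts cur (check, rest) i0 = (check, rest) := by
          simp only [pvStepA]
          rw [if_neg (by rw [hc0']; exact Bool.false_ne_true)]
        have hfull : (i0 :: L).filter (fun i => check.getD i 0 == 0 && pvNear cur (pts.getD i (0, 0)))
            = L.filter (fun i => check.getD i 0 == 0 && pvNear cur (pts.getD i (0, 0))) := by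
          rw [List.filter_cons_of_neg (by rw [hc0']; simp)]
        rw [List.foldl_cons, hstep, hfull]
        exact ih hnd' hL' check rest hlen

inductive pvRch (pts : List (Int × Int)) (h : Int × Int) : Nat → Prop
  | base (i : Nat) : i < pts.length → pvNear h (pts.getD i (0, 0)) = true → pvRch pts h i
  | step (j i : Nat) : pvRch pts h j → i < pts.length →
      pvNear (pts.getD j (0, 0)) (pts.getD i (0, 0)) = true → pvRch pts h i

def pvAns (pts : List (Int × Int)) (h f : Int × Int) : Prop :=
  pvNear h f = true ∨ ∃ i < pts.length, pvRch pts h i ∧ pvNear (pts.getD i (0, 0)) f = true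

def pvZc (check : List Int) (n : Nat) : Nat :=
  ((List.range n).filter (fun i => check.getD i 0 == 0)).length

def pvInv (pts : List (Int × Int)) (h f : Int × Int) (check : List Int)
    (queue : List (Int × Int)) (Proc : Int × Int → Prop) : Prop :=
  check.length = pts.length ∧
  (∀ q ∈ queue, q = h ∨ ∃ i < pts.length, q = pts.getD i (0, 0) ∧ pvRch pts h i) ∧
  (∀ i < pts.length, check.getD i 0 ≠ 0 → pvRch pts h i) ∧
  (∀ p, Proc p → ∀ i < pts.length, pvNear p (pts.getD i (0, 0)) = true → check.getD i 0 ≠ 0) ∧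
  (∀ p, Proc p → pvNear p f = false) ∧
  (h ∈ queue ∨ Proc h) ∧
  (∀ i < pts.length, check.getD i 0 ≠ 0 → pts.getD i (0, 0) ∈ queue ∨ Proc (pts.getD i (0, 0)))

theorem pv_filter_split {α : Type} (l : List α) (p q : α → Bool) :
    (l.filter (fun x => p x && q x)).length + (l.filter (fun x => p x && !q x)).length
      = (l.filter p).length := by
  induction l with
  | nil => simp
  | cons a t ih =>
      by_cases hp : p a <;> by_cases hq : q a <;>
        simp [List.filter, hp, hq] <;> omega

theorem pvRch_lt {pts : List (Int × Int)} {h : Int × Int} {i : Nat} (hr : pvRch pts h i) :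
    i < pts.length := by
  cases hr with
  | base _ hi _ => exact hi
  | step _ _ _ hi _ => exact hi

theorem pv_bfs_correct (pts : List (Int × Int)) (h f : Int × Int) :
    ∀ (fuel : Nat) (check : List Int) (queue : List (Int × Int)) (Proc : Int × Int → Prop),
      pvInv pts h f check queue Proc →
      queue.length + 2 * pvZc check pts.length < fuel →
      (pvBfs pts f fuel check queue = "happy" ↔ pvAns pts h f) := by
  intro fuel
  induction fuel with
  | zero => intro check queue Proc _ hlt; exact absurd hlt (Nat.not_lt_zero _)
  | succ fuel ih =>
      intro check queue Proc hinv hlt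
      obtain ⟨I1, Iq, Ic, Icl, Inf, Ih, Icov⟩ := hinv
      cases queue with
      | nil =>
          have hProcH : Proc h := Ih.resolve_left (by simp)
          have CK : ∀ i, pvRch pts h i → check.getD i 0 ≠ 0 := by
            intro i hr
            induction hr with
            | base i hi hn => exact Icl h hProcH i hi hn
            | step j i hrj hi hn ihj =>
                have hj : j < pts.length := pvRch_lt hrj
                have hpj : Proc (pts.getD j (0, 0)) :=
                  (Icov j hj ihj).resolve_left (by simp)
                exact Icl _ hpj i hi hn
          have hnoans : ¬ pvAns pts h f := by
            rintro (hnf | ⟨i, hi, hr, hnif⟩)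
            · rw [Inf h hProcH] at hnf; exact Bool.false_ne_true hnf
            · have hpi : Proc (pts.getD i (0, 0)) :=
                (Icov i hi (CK i hr)).resolve_left (by simp)
              rw [Inf _ hpi] at hnif; exact Bool.false_ne_true hnif
          simp only [pvBfs]
          constructor
          · intro e; exact absurd e (by decide)
          · intro ha; exact absurd ha hnoans
      | cons cur rest =>
          by_cases hnf : pvNear cur f = true
          · have hans : pvAns pts h f := by
              rcases Iq cur (List.mem_cons_self ..) with hh | ⟨i, hi, he, hr⟩
              · exact Or.inl (hh ▸ hnf)
              · exact Or.inr ⟨i, hi, hr, he ▸ hnf⟩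
            simp only [pvBfs, hnf, if_true]
            exact ⟨fun _ => hans, fun _ => trivial⟩
          · have hnd : (List.range pts.length).Nodup := List.nodup_range
            have hmemlt : ∀ i ∈ List.range pts.length, i < pts.length := by
              intro i hi; exact List.mem_range.mp hi
            obtain ⟨g1, g2, g3⟩ := pv_foldA_go pts cur (List.range pts.length) hnd hmemlt check rest I1
            set newIdx := (List.range pts.length).filter
              (fun i => check.getD i 0 == 0 && pvNear cur (pts.getD i (0, 0))) with hnew
            set st := (List.range pts.length).foldl (pvStepA pts cur) (check, rest) with hst
            have hmemNew : ∀ i ∈ newIdx,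
                i < pts.length ∧ check.getD i 0 = 0 ∧ pvNear cur (pts.getD i (0, 0)) = true := by
              intro i hi
              rw [hnew, List.mem_filter, List.mem_range] at hi
              obtain ⟨h1, h2⟩ := hi
              rw [Bool.and_eq_true, beq_iff_eq] at h2
              exact ⟨h1, h2.1, h2.2⟩
            have hRchNew : ∀ i ∈ newIdx, pvRch pts h i := by
              intro i hi
              obtain ⟨hi1, _, hi3⟩ := hmemNew i hi
              rcases Iq cur (List.mem_cons_self ..) with hh | ⟨j, hj, he, hr⟩
              · exact pvRch.base i hi1 (hh ▸ hi3)
              · exact pvRch.step j i hr hi1 (he ▸ hi3)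
            have hnfF : pvNear cur f = false := by
              cases hc : pvNear cur f with
              | false => rfl
              | true => exact absurd hc hnf
            have hInv' : pvInv pts h f st.1 st.2 (fun p => Proc p ∨ p = cur) := by
              refine ⟨g1, ?_, ?_, ?_, ?_, ?_, ?_⟩
              · intro x hx
                rw [g3, List.mem_append] at hx
                rcases hx with hx | hx
                · exact Iq x (List.mem_cons_of_mem _ hx)
                · obtain ⟨i, hi, he⟩ := List.mem_map.mp hx
                  exact Or.inr ⟨i, (hmemNew i hi).1, he.symm, hRchNew i hi⟩
              · intro i hi hne
                rw [g2 i] at hne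
                by_cases hiN : i ∈ newIdx
                · exact hRchNew i hiN
                · rw [if_neg hiN] at hne; exact Ic i hi hne
              · rintro p (hp | rfl) i hi hn
                · rw [g2 i]
                  by_cases hiN : i ∈ newIdx
                  · rw [if_pos hiN]; decide
                  · rw [if_neg hiN]; exact Icl p hp i hi hn
                · rw [g2 i]
                  by_cases hiN : i ∈ newIdx
                  · rw [if_pos hiN]; decide
                  · rw [if_neg hiN]
                    intro hz
                    apply hiN
                    rw [hnew, List.mem_filter, List.mem_range]
                    exact ⟨hi, by rw [hz, hn]; rfl⟩
              · rintro p (hp | rfl)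
                · exact Inf p hp
                · exact hnfF
              · rcases Ih with hh | hp
                · rcases List.mem_cons.mp hh with rfl | hh
                  · exact Or.inr (Or.inr rfl)
                  · exact Or.inl (by rw [g3]; exact List.mem_append_left _ hh)
                · exact Or.inr (Or.inl hp)
              · intro i hi hne
                rw [g2 i] at hne
                by_cases hiN : i ∈ newIdx
                · refine Or.inl ?_
                  rw [g3]
                  exact List.mem_append_right _ (List.mem_map.mpr ⟨i, hiN, rfl⟩)
                · rw [if_neg hiN] at hne
                  rcases Icov i hi hne with hq | hp
                  · rcases List.mem_cons.mp hq with he | hq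
                    · exact Or.inr (Or.inr he)
                    · exact Or.inl (by rw [g3]; exact List.mem_append_left _ hq)
                  · exact Or.inr (Or.inl hp)
            have hzc : newIdx.length + pvZc st.1 pts.length = pvZc check pts.length := by
              have hcong : (List.range pts.length).filter (fun i => st.1.getD i 0 == 0)
                  = (List.range pts.length).filter
                      (fun i => (check.getD i 0 == 0) && !(pvNear cur (pts.getD i (0, 0)))) := by
                apply List.filter_congr
                intro i hi
                rw [g2 i]
                by_cases hiN : i ∈ newIdx
                · rw [if_pos hiN]
                  obtain ⟨_, h2, h3⟩ := hmemNew i hiN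
                  rw [h3]
                  simp
                · rw [if_neg hiN]
                  by_cases hc : check.getD i 0 = 0
                  · have hnn : pvNear cur (pts.getD i (0, 0)) = false := by
                      cases hb : pvNear cur (pts.getD i (0, 0)) with
                      | false => rfl
                      | true =>
                          exfalso; apply hiN
                          rw [hnew, List.mem_filter]
                          exact ⟨hi, by rw [hc, hb]; rfl⟩
                    rw [hnn, Bool.not_false, Bool.and_true]
                  · have hcb : (check.getD i 0 == 0) = false := by
                      rw [beq_eq_false_iff_ne]; exact hc
                    rw [hcb]; rfl
              unfold pvZc
              rw [hcong, hnew]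
              exact pv_filter_split _ _ _
            have hlen2 : st.2.length = rest.length + newIdx.length := by
              rw [g3]; simp
            have hmeas : st.2.length + 2 * pvZc st.1 pts.length < fuel := by
              simp only [List.length_cons] at hlt
              omega
            have := ih st.1 st.2 _ hInv' hmeas
            simp only [pvBfs, hnfF, Bool.false_eq_true, if_false]
            exact this

theorem pv_zc_replicate (n : Nat) : pvZc (List.replicate n 0) n = n := by
  unfold pvZc
  rw [List.filter_eq_self.mpr, List.length_range]
  intro i hi
  rw [List.mem_range] at hi
  simp [List.getD_eq_getElem?_getD, List.getElem?_replicate, hi]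

theorem pv_A_char (pts : List (Int × Int)) (h f : Int × Int) :
    (pvBfs pts f (2 * pts.length + 2) (List.replicate pts.length 0) [h] = "happy"
      ↔ pvAns pts h f) := by
  have hz : ∀ i < pts.length, (List.replicate pts.length (0:Int)).getD i 0 = 0 := by
    intro i hi
    simp [List.getD_eq_getElem?_getD, List.getElem?_replicate, hi]
  apply pv_bfs_correct pts h f _ _ _ (fun _ => False)
  · refine ⟨by simp, ?_, ?_, ?_, ?_, ?_, ?_⟩
    · intro q hq; exact Or.inl (by simpa using hq)
    · intro i hi hne; exact absurd (hz i hi) hne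
    · intro p hp; exact hp.elim
    · intro p hp; exact hp.elim
    · exact Or.inl (List.mem_singleton.mpr rfl)
    · intro i hi hne; exact absurd (hz i hi) hne
  · rw [pv_zc_replicate]
    simp; omega

-- ===== B side =====

theorem pv_foldl_const {α : Type} (g : α → α) (x : α) (n : Nat) :
    (List.range n).foldl (fun r _ => g r) x = g^[n] x := by
  induction n with
  | zero => simp
  | succ k ih => rw [List.range_succ, List.foldl_append, ih, List.foldl_cons, List.foldl_nil,
      Function.iterate_succ_apply']

theorem pv_getD_map_range {α : Type} (f : Nat → α) (d : α) (n i : Nat) (hi : i < n) :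
    ((List.range n).map f).getD i d = f i := by
  simp [List.getD_eq_getElem?_getD, List.getElem?_map, List.getElem?_range, hi]

theorem pv_stepB_len (pts : List (Int × Int)) (r : List Bool) :
    (pvStepB pts r).length = pts.length := by
  simp [pvStepB]

theorem pv_stepB_getD (pts : List (Int × Int)) (r : List Bool) (i : Nat) (hi : i < pts.length) :
    (pvStepB pts r).getD i false =
      (r.getD i false ||
        (List.range pts.length).any (fun j =>
          r.getD j false && pvNear (pts.getD j (0, 0)) (pts.getD i (0, 0)))) := by
  unfold pvStepB
  exact pv_getD_map_range _ _ _ _ hi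

theorem pv_iter_len (pts : List (Int × Int)) (h : Int × Int) (k : Nat) :
    ((pvStepB pts)^[k] (pts.map (fun p => pvNear h p))).length = pts.length := by
  induction k with
  | zero => simp
  | succ k ih => rw [Function.iterate_succ_apply', pv_stepB_len]

theorem pv_init_getD (pts : List (Int × Int)) (h : Int × Int) (i : Nat) (hi : i < pts.length) :
    (pts.map (fun p => pvNear h p)).getD i false = pvNear h (pts.getD i (0, 0)) := by
  simp [List.getD_eq_getElem?_getD, List.getElem?_map, List.getElem?_eq_getElem hi]

theorem pv_iter_sound (pts : List (Int × Int)) (h : Int × Int) :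
    ∀ (k i : Nat), i < pts.length →
      ((pvStepB pts)^[k] (pts.map (fun p => pvNear h p))).getD i false = true →
      pvRch pts h i := by
  intro k
  induction k with
  | zero =>
      intro i hi ht
      rw [Function.iterate_zero_apply, pv_init_getD pts h i hi] at ht
      exact pvRch.base i hi ht
  | succ k ih =>
      intro i hi ht
      rw [Function.iterate_succ_apply', pv_stepB_getD pts _ i hi, Bool.or_eq_true] at ht
      rcases ht with ht | ht
      · exact ih i hi ht
      · rw [List.any_eq_true] at ht
        obtain ⟨j, hj, hja⟩ := ht
        rw [Bool.and_eq_true] at hja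
        have hjn : j < pts.length := List.mem_range.mp hj
        exact pvRch.step j i (ih j hjn hja.1) hi hja.2

theorem pv_iter_mono (pts : List (Int × Int)) (h : Int × Int) :
    ∀ (k i : Nat),
      ((pvStepB pts)^[k] (pts.map (fun p => pvNear h p))).getD i false = true →
      ((pvStepB pts)^[k + 1] (pts.map (fun p => pvNear h p))).getD i false = true := by
  intro k i ht
  by_cases hi : i < pts.length
  · rw [Function.iterate_succ_apply', pv_stepB_getD pts _ i hi, ht, Bool.true_or]
  · exfalso
    rw [List.getD_eq_getElem?_getD, List.getElem?_eq_none] at ht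
    · exact Bool.false_ne_true ht
    · rw [pv_iter_len]; omega

theorem pv_iter_mono_le (pts : List (Int × Int)) (h : Int × Int) {k m : Nat} (hkm : k ≤ m) :
    ∀ i, ((pvStepB pts)^[k] (pts.map (fun p => pvNear h p))).getD i false = true →
      ((pvStepB pts)^[m] (pts.map (fun p => pvNear h p))).getD i false = true := by
  induction m with
  | zero => intro i ht; rw [Nat.le_zero.mp hkm] at ht; exact ht
  | succ m ih =>
      intro i ht
      rcases Nat.lt_or_ge k (m + 1) with hlt | hge
      · exact pv_iter_mono pts h m i (ih (Nat.lt_succ_iff.mp hlt) i ht)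
      · rw [Nat.le_antisymm hkm hge] at ht; exact ht

theorem pv_iter_complete (pts : List (Int × Int)) (h : Int × Int) {i : Nat}
    (hr : pvRch pts h i) :
    ∃ k, ((pvStepB pts)^[k] (pts.map (fun p => pvNear h p))).getD i false = true := by
  induction hr with
  | base i hi hn =>
      exact ⟨0, by rw [Function.iterate_zero_apply, pv_init_getD pts h i hi]; exact hn⟩
  | step j i hrj hi hn ihj =>
      obtain ⟨k, hk⟩ := ihj
      refine ⟨k + 1, ?_⟩
      rw [Function.iterate_succ_apply', pv_stepB_getD pts _ i hi, Bool.or_eq_true]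
      refine Or.inr (List.any_eq_true.mpr ⟨j, List.mem_range.mpr (pvRch_lt hrj), ?_⟩)
      rw [Bool.and_eq_true]
      exact ⟨hk, hn⟩

-- pointwise stability at step k
def pvStb (pts : List (Int × Int)) (h : Int × Int) (k : Nat) : Prop :=
  ∀ i < pts.length,
    ((pvStepB pts)^[k + 1] (pts.map (fun p => pvNear h p))).getD i false =
    ((pvStepB pts)^[k] (pts.map (fun p => pvNear h p))).getD i false

theorem pv_stb_fix (pts : List (Int × Int)) (h : Int × Int) {k : Nat} (hs : pvStb pts h k) :
    ∀ m, k ≤ m →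
      (pvStepB pts)^[m] (pts.map (fun p => pvNear h p)) =
      (pvStepB pts)^[k] (pts.map (fun p => pvNear h p)) := by
  have heq : (pvStepB pts)^[k + 1] (pts.map (fun p => pvNear h p)) =
      (pvStepB pts)^[k] (pts.map (fun p => pvNear h p)) := by
    apply List.ext_getElem
    · rw [pv_iter_len, pv_iter_len]
    · intro i h1 h2
      have hi : i < pts.length := by rw [pv_iter_len] at h2; exact h2
      have := hs i hi
      rw [List.getD_eq_getElem?_getD, List.getD_eq_getElem?_getD,
        List.getElem?_eq_getElem h1, List.getElem?_eq_getElem h2] at this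
      simpa using this
  intro m hkm
  induction m with
  | zero => rw [Nat.le_zero.mp hkm]
  | succ m ih =>
      rcases Nat.lt_or_ge k (m + 1) with hlt | hge
      · have hm := ih (Nat.lt_succ_iff.mp hlt)
        rw [Function.iterate_succ_apply', hm,
          ← Function.iterate_succ_apply' (pvStepB pts) k (pts.map (fun p => pvNear h p)), heq]
      · rw [Nat.le_antisymm hkm hge]

def pvTS (pts : List (Int × Int)) (h : Int × Int) (k : Nat) : Finset Nat :=
  (Finset.range pts.length).filter
    (fun i => ((pvStepB pts)^[k] (pts.map (fun p => pvNear h p))).getD i false = true)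

theorem pv_TS_mono (pts : List (Int × Int)) (h : Int × Int) (k : Nat) :
    pvTS pts h k ⊆ pvTS pts h (k + 1) := by
  intro i hi
  rw [pvTS, Finset.mem_filter] at hi ⊢
  exact ⟨hi.1, pv_iter_mono pts h k i hi.2⟩

theorem pv_TS_card_lt (pts : List (Int × Int)) (h : Int × Int) (k : Nat)
    (hns : ¬ pvStb pts h k) :
    (pvTS pts h k).card < (pvTS pts h (k + 1)).card := by
  apply Finset.card_lt_card
  rw [Finset.ssubset_iff_of_subset (pv_TS_mono pts h k)]
  rw [pvStb] at hns
  push_neg at hns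
  obtain ⟨i, hi, hne⟩ := hns
  refine ⟨i, ?_, ?_⟩
  · rw [pvTS, Finset.mem_filter]
    refine ⟨Finset.mem_range.mpr hi, ?_⟩
    cases hb0 : ((pvStepB pts)^[k] (pts.map (fun p => pvNear h p))).getD i false with
    | true => exact pv_iter_mono pts h k i hb0
    | false =>
        cases hb1 : ((pvStepB pts)^[k + 1] (pts.map (fun p => pvNear h p))).getD i false with
        | true => rfl
        | false => exact absurd (by rw [hb1, hb0]) hne
  · intro hmem
    rw [pvTS, Finset.mem_filter] at hmem
    exact hne (by rw [pv_iter_mono pts h k i hmem.2, hmem.2])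

theorem pv_exists_stb (pts : List (Int × Int)) (h : Int × Int) :
    ∃ k ≤ pts.length, pvStb pts h k := by
  by_contra hc
  push_neg at hc
  have hcard : ∀ k, k ≤ pts.length + 1 → k ≤ (pvTS pts h k).card := by
    intro k
    induction k with
    | zero => intro _; exact Nat.zero_le _
    | succ k ih =>
        intro hk
        have h1 : k ≤ (pvTS pts h k).card := ih (by omega)
        have h2 : (pvTS pts h k).card < (pvTS pts h (k + 1)).card :=
          pv_TS_card_lt pts h k (hc k (by omega))
        omega
  have hle : (pvTS pts h (pts.length + 1)).card ≤ pts.length := by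
    calc (pvTS pts h (pts.length + 1)).card ≤ (Finset.range pts.length).card :=
          Finset.card_filter_le _ _
      _ = pts.length := Finset.card_range _
  have := hcard (pts.length + 1) (le_refl _)
  omega

theorem pv_iter_bound (pts : List (Int × Int)) (h : Int × Int) {K i : Nat}
    (ht : ((pvStepB pts)^[K] (pts.map (fun p => pvNear h p))).getD i false = true) :
    ((pvStepB pts)^[pts.length] (pts.map (fun p => pvNear h p))).getD i false = true := by
  obtain ⟨k, hk, hs⟩ := pv_exists_stb pts h
  rcases Nat.le_total K pts.length with hK | hK
  · exact pv_iter_mono_le pts h hK i ht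
  · rw [pv_stb_fix pts h hs K (by omega)] at ht
    rw [pv_stb_fix pts h hs pts.length hk]
    exact ht

theorem pv_B_char (pts : List (Int × Int)) (h f : Int × Int) :
    ((pvNear h f ||
        (List.range pts.length).any (fun i =>
          ((List.range pts.length).foldl (fun r _ => pvStepB pts r)
              (pts.map (fun p => pvNear h p))).getD i false
            && pvNear (pts.getD i (0, 0)) f)) = true
      ↔ pvAns pts h f) := by
  rw [pv_foldl_const]
  constructor
  · intro ht
    rw [Bool.or_eq_true] at ht
    rcases ht with ht | ht
    · exact Or.inl ht
    · rw [List.any_eq_true] at ht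
      obtain ⟨i, hi, hia⟩ := ht
      rw [Bool.and_eq_true] at hia
      have hin : i < pts.length := List.mem_range.mp hi
      exact Or.inr ⟨i, hin, pv_iter_sound pts h pts.length i hin hia.1, hia.2⟩
  · intro ha
    rw [Bool.or_eq_true]
    rcases ha with ha | ⟨i, hi, hr, hnf⟩
    · exact Or.inl ha
    · refine Or.inr (List.any_eq_true.mpr ⟨i, List.mem_range.mpr hi, ?_⟩)
      rw [Bool.and_eq_true]
      obtain ⟨K, hK⟩ := pv_iter_complete pts h hr
      exact ⟨pv_iter_bound pts h hK, hnf⟩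

theorem pv_bfs_values (pts : List (Int × Int)) (f : Int × Int) :
    ∀ (fuel : Nat) (check : List Int) (queue : List (Int × Int)),
      pvBfs pts f fuel check queue = "happy" ∨ pvBfs pts f fuel check queue = "sad" := by
  intro fuel
  induction fuel with
  | zero => intro check queue; exact Or.inr rfl
  | succ fuel ih =>
      intro check queue
      cases queue with
      | nil => exact Or.inr rfl
      | cons cur rest =>
          by_cases hnf : pvNear cur f = true
          · simp only [pvBfs, hnf, if_true]
            exact Or.inl trivial
          · have hnfF : pvNear cur f = false := by
              cases hc : pvNear cur f with
              | false => rfl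
              | true => exact absurd hc hnf
            simp only [pvBfs, hnfF, Bool.false_eq_true, if_false]
            exact ih _ _

-- ===== VERDICT (by name: the statement is the Claim_ definition above) =====
theorem solution_spec : Claim_equal_solution := by
  intro N home marks fes _hdom _hpre
  show solution N home marks fes = solution_alt N home marks fes
  have hA : solution N home marks fes
      = pvBfs (marks.take N.toNat) fes (2 * (marks.take N.toNat).length + 2)
          (List.replicate (marks.take N.toNat).length 0) [home] := rfl
  have hB : solution_alt N home marks fes
      = (if (pvNear home fes ||
            (List.range (marks.take N.toNat).length).any (fun i =>
              ((List.range (marks.take N.toNat).length).foldl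
                  (fun r _ => pvStepB (marks.take N.toNat) r)
                  ((marks.take N.toNat).map (fun p => pvNear home p))).getD i false
                && pvNear ((marks.take N.toNat).getD i (0, 0)) fes))
          then "happy" else "sad") := rfl
  rw [hA, hB]
  have ha := pv_A_char (marks.take N.toNat) home fes
  have hb := pv_B_char (marks.take N.toNat) home fes
  by_cases hans : pvAns (marks.take N.toNat) home fes
  · rw [ha.mpr hans, hb.mpr hans]; rfl
  · have h1 : pvBfs (marks.take N.toNat) fes (2 * (marks.take N.toNat).length + 2)
        (List.replicate (marks.take N.toNat).length 0) [home] = "sad" := by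
      rcases pv_bfs_values (marks.take N.toNat) fes _ _ _ with he | he
      · exact absurd (ha.mp he) hans
      · exact he
    have h2 : (pvNear home fes ||
        (List.range (marks.take N.toNat).length).any (fun i =>
          ((List.range (marks.take N.toNat).length).foldl
              (fun r _ => pvStepB (marks.take N.toNat) r)
              ((marks.take N.toNat).map (fun p => pvNear home p))).getD i false
            && pvNear ((marks.take N.toNat).getD i (0, 0)) fes)) = false := by
      cases hc : (pvNear home fes ||
        (List.range (marks.take N.toNat).length).any (fun i =>
          ((List.range (marks.take N.toNat).length).foldl
              (fun r _ => pvStepB (marks.take N.toNat) r)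
              ((marks.take N.toNat).map (fun p => pvNear home p))).getD i false
            && pvNear ((marks.take N.toNat).getD i (0, 0)) fes)) with
      | false => rfl
      | true => exact absurd (hb.mp hc) hans
    rw [h1, h2]
    rfl

@[simp] theorem solution_raises : Claim_raises_solution := by
  unfold Claim_raises_solution
  refine ⟨?_, by decide⟩
  intro N home marks fes _ hr hpre
  unfold Raises_solution at hr
  unfold Pre_solution at hpre
  rcases hpre with hle | htrue
  · omega
  · rw [hr.2] at htrue
    exact Bool.false_ne_true htrue
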